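-- pv_equiv track=rewrite | github.com/zonjfuturebo/slice_cpg_graph | slice_test/get_chain.py | dfs_method_chain
-- ===== SOURCE A (Python) =====
-- import copy
--
-- def dfs_method_chain(father_id, method_map, res, method_chain: list, depth):
--     """
--     深度遍历
--     :param father_id:
--     :param method_map:
--     :param res:
--     :param method_chain:
--     :param depth:
--     :return:
--     """
--     if depth > 7:
--         return method_chain
--     temp = method_map[father_id]  # 获取调用method_id的方法的id
--     if len(temp) == 0 or len(method_chain) > 10:  # 如果递归到头，就存储一下结果, 并且如果大于chain大于10，则停止
--         method_chain.append(res)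
--         return method_chain
--     for id in temp:
--         res.append(id)
--         method_chain = dfs_method_chain(id, method_map, copy.deepcopy(res), copy.deepcopy(method_chain),
--                                         depth + 1)  # 注意要用深拷贝
--         res.pop()
--
--     return method_chain
-- ===== SOURCE B (Python) =====
-- def dfs_method_chain(father_id, method_map, res, method_chain: list, depth):
--     # Iterative explicit-stack DFS; mutates method_chain only in the same
--     # root base-case as the original (method_chain.append(res)).
--     if depth > 7:
--         return method_chain
--     temp = method_map[father_id]
--     if len(temp) == 0 or len(method_chain) > 10:
--         method_chain.append(res)
--         return method_chain
--     result = list(method_chain)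
--     stack = [(father_id, list(res), depth)]
--     while stack:
--         fid, path, d = stack[0]
--         stack = stack[1:]
--         if d > 7:
--             continue
--         children = method_map[fid]
--         if len(children) == 0 or len(result) > 10:
--             result.append(path)
--             continue
--         stack = [(c, path + [c], d + 1) for c in children] + stack
--     return result
-- ===== Notes on version B (the rewrite author's own statement) =====
-- stated objective: alternative
-- what changed: Replaces the recursive DFS that threads method_chain through deep-copied recursive calls by an iterative explicit-stack DFS over (node, path, depth) frames sharing one result list.
import Mathlib
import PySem

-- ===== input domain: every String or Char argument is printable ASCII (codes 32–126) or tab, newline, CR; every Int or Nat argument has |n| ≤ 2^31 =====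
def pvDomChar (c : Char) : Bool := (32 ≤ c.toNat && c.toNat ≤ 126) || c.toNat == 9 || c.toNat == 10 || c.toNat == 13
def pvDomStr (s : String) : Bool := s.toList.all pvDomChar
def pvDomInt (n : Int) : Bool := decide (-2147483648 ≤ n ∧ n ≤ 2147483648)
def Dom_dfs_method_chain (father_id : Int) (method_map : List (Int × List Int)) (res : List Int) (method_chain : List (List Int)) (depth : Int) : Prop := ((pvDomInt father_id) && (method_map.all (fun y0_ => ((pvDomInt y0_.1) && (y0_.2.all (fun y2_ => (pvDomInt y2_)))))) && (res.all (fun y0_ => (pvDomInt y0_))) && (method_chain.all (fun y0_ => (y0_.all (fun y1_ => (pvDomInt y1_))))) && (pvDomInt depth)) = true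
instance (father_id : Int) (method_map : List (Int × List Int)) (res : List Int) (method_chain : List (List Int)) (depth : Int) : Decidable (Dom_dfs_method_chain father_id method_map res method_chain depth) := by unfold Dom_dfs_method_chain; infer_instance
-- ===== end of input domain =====

-- B replaces A's recursive DFS (which threads the chain through deep-copied
-- recursive calls) by an iterative explicit-stack DFS sharing one result list;
-- same cost, different decomposition. Equivalence is about the RETURN value:
-- both A and B mutate method_chain (append res) only in the root base case.

-- ===== PORT A =====
-- first-match association-list lookup = Python dict subscript (none = KeyError)
def pvLookup : List (Int × List Int) → Int → Option (List Int)
  | [], _ => none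
  | (k, v) :: rest, x => if k = x then some v else pvLookup rest x

-- A's recursion on `depth` ported with fuel = (8 - depth).toNat, which is 0 exactly
-- when depth > 7; the recursive call at depth+1 becomes the structural call at fuel-1.
def pvDfsA (mm : List (Int × List Int)) : Nat → Int → List Int → List (List Int) → List (List Int)
  | 0, _, _, mc => mc
  | fuel + 1, f, res, mc =>
    match pvLookup mm f with
    | none => mc  -- Python raises KeyError here; excluded by Pre_
    | some temp =>
      if temp.length = 0 ∨ mc.length > 10 then mc ++ [res]
      else temp.foldl (fun m id => pvDfsA mm fuel id (res ++ [id]) m) mc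

def dfs_method_chain (father_id : Int) (method_map : List (Int × List Int)) (res : List Int) (method_chain : List (List Int)) (depth : Int) : List (List Int) :=
  pvDfsA method_map (8 - depth).toNat father_id res method_chain

-- ===== PORT B =====
-- bound on the length of any children list in the map (for the loop's termination measure)
def pvMaxLen (mm : List (Int × List Int)) : Nat :=
  mm.foldr (fun p m => Nat.max p.2.length m) 0

lemma pvLookup_len_le (mm : List (Int × List Int)) (x : Int) (v : List Int)
    (h : pvLookup mm x = some v) : v.length ≤ pvMaxLen mm := by
  induction mm with
  | nil => simp [pvLookup] at h
  | cons p rest ih =>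
    obtain ⟨k, w⟩ := p
    simp only [pvLookup] at h
    by_cases hk : k = x
    · simp [hk] at h
      subst h
      exact Nat.le_max_left _ _
    · simp [hk] at h
      exact le_trans (ih h) (Nat.le_max_right _ _)

lemma pvSum_map_const {α : Type} (xs : List α) (w : Nat) :
    (xs.map (fun _ => w)).sum = xs.length * w := by
  induction xs with
  | nil => simp
  | cons a l ih => simp [Nat.succ_mul]; omega

-- B's while loop over the explicit stack of (node, path, depth) frames;
-- frames pushed for the children of a popped frame, leftmost on top.
def pvLoop (mm : List (Int × List Int)) : List (Int × List Int × Int) → List (List Int) → List (List Int)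
  | [], result => result
  | (fid, path, d) :: rest, result =>
    if d > 7 then pvLoop mm rest result
    else
      match hv : pvLookup mm fid with  -- named so the termination proof can bound children.length
      | none => pvLoop mm rest result  -- Python raises KeyError here; excluded by Pre_
      | some children =>
        if children.length = 0 ∨ result.length > 10 then
          pvLoop mm rest (result ++ [path])
        else
          pvLoop mm ((children.map (fun c => (c, path ++ [c], d + 1))) ++ rest) result
  termination_by stack _ => ((stack.map (fun fr => (pvMaxLen mm + 1) ^ (8 - fr.2.2).toNat)).sum)
  decreasing_by
  · have h1 : 1 ≤ (pvMaxLen mm + 1) ^ (8 - d).toNat := Nat.one_le_pow _ _ (by omega)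
    simp only [List.map_cons, List.sum_cons]; omega
  · have h1 : 1 ≤ (pvMaxLen mm + 1) ^ (8 - d).toNat := Nat.one_le_pow _ _ (by omega)
    simp only [List.map_cons, List.sum_cons]; omega
  · have h1 : 1 ≤ (pvMaxLen mm + 1) ^ (8 - d).toNat := Nat.one_le_pow _ _ (by omega)
    simp only [List.map_cons, List.sum_cons]; omega
  · rename_i hd hleaf
    have hlen : children.length ≤ pvMaxLen mm := pvLookup_len_le mm fid children hv
    have hk : (8 - d).toNat = ((8 - (d + 1)).toNat) + 1 := by omega
    have h1 : 1 ≤ (pvMaxLen mm + 1) ^ (8 - (d + 1)).toNat := Nat.one_le_pow _ _ (by omega)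
    simp only [List.map_append, List.map_map, List.sum_append, List.map_cons, List.sum_cons,
      Function.comp_def]
    rw [pvSum_map_const]
    have key : children.length * (pvMaxLen mm + 1) ^ (8 - (d + 1)).toNat
        < (pvMaxLen mm + 1) ^ (8 - d).toNat := by
      rw [hk, pow_succ]
      nlinarith [h1, hlen]
    omega

def dfs_method_chain_alt (father_id : Int) (method_map : List (Int × List Int)) (res : List Int) (method_chain : List (List Int)) (depth : Int) : List (List Int) :=
  if depth > 7 then method_chain
  else
    match pvLookup method_map father_id with
    | none => method_chain  -- Python raises KeyError here; excluded by Pre_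
    | some temp =>
      if temp.length = 0 ∨ method_chain.length > 10 then method_chain ++ [res]
      else pvLoop method_map [(father_id, res, depth)] method_chain

-- ===== PRECONDITION & SPEC =====
-- one dedup-BFS expansion step: add to `seen` every child of a `seen` node not yet seen
def pvExpand (mm : List (Int × List Int)) (seen : List Int) : List Int :=
  (seen.flatMap fun i => (mm.lookup i).getD []).foldl
    (fun s x => if x ∈ s then s else s ++ [x]) seen

-- nodes reachable from `start` in at most k steps (dedup keeps it small on cycles)
def pvReach (mm : List (Int × List Int)) : Nat → List Int → List Int
  | 0, start => start
  | k + 1, start => pvExpand mm (pvReach mm k start)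

-- Pre_ excludes exactly the inputs on which Python A raises KeyError: every id
-- reachable from father_id within the remaining depth budget (7 - depth steps,
-- capped at the map size, since A only ever looks up such ids) must be a key of
-- method_map; when depth > 7 or len(method_chain) > 10 only the trivially needed
-- keys are required. It still excludes the rare inputs where a reachable id is
-- missing but A returns because the chain-length cutoff fires first along every
-- path to it (see the cite in the claim).
def Pre_dfs_method_chain (father_id : Int) (method_map : List (Int × List Int)) (res : List Int) (method_chain : List (List Int)) (depth : Int) : Prop :=
  depth > 7 ∨
    (father_id ∈ method_map.map Prod.fst ∧
      (method_chain.length > 10 ∨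
        ∀ c ∈ pvReach method_map (min (7 - depth).toNat (method_map.length + 1)) [father_id],
          c ∈ method_map.map Prod.fst))
instance (father_id : Int) (method_map : List (Int × List Int)) (res : List Int) (method_chain : List (List Int)) (depth : Int) : Decidable (Pre_dfs_method_chain father_id method_map res method_chain depth) := by unfold Pre_dfs_method_chain; infer_instance

def pvWitness_dfs_method_chain : Int × (List (Int × List Int)) × List Int × List (List Int) × Int :=
  (0, [(0, [1]), (1, [])], [], [], 0)

def Spec_dfs_method_chain (father_id : Int) (method_map : List (Int × List Int)) (res : List Int) (method_chain : List (List Int)) (depth : Int) (out : List (List Int)) : Prop := out = dfs_method_chain_alt father_id method_map res method_chain depth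
instance (father_id : Int) (method_map : List (Int × List Int)) (res : List Int) (method_chain : List (List Int)) (depth : Int) (out : List (List Int)) : Decidable (Spec_dfs_method_chain father_id method_map res method_chain depth out) := by unfold Spec_dfs_method_chain; infer_instance

-- ===== CLAIM (what is proved, stated in full; the proofs are below) =====
def Claim_equal_dfs_method_chain : Prop := ∀ (father_id : Int) (method_map : List (Int × List Int)) (res : List Int) (method_chain : List (List Int)) (depth : Int), Dom_dfs_method_chain father_id method_map res method_chain depth → Pre_dfs_method_chain father_id method_map res method_chain depth → Spec_dfs_method_chain father_id method_map res method_chain depth (dfs_method_chain father_id method_map res method_chain depth)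

-- ===== LEMMAS AND PROOFS =====

-- processing the frames of all children of one node = folding A's recursion over them
lemma pvLoop_frames (mm : List (Int × List Int)) (n : Nat)
    (ih : ∀ (f : Int) (path : List Int) (d : Int) (rest : List (Int × List Int × Int)) (acc : List (List Int)),
      (8 - d).toNat = n → pvLoop mm ((f, path, d) :: rest) acc = pvLoop mm rest (pvDfsA mm n f path acc)) :
    ∀ (children : List Int) (path : List Int) (d1 : Int), (8 - d1).toNat = n →
      ∀ (rest : List (Int × List Int × Int)) (acc : List (List Int)),
        pvLoop mm ((children.map (fun c => (c, path ++ [c], d1))) ++ rest) acc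
          = pvLoop mm rest (children.foldl (fun m c => pvDfsA mm n c (path ++ [c]) m) acc) := by
  intro children
  induction children with
  | nil => intro path d1 h rest acc; simp
  | cons c cs ihc =>
    intro path d1 h rest acc
    simp only [List.map_cons, List.cons_append, List.foldl_cons]
    rw [ih c (path ++ [c]) d1 _ acc h, ihc path d1 h]

-- processing one frame (and all its descendants) = A's recursion at that frame
lemma pvLoop_frame : ∀ (fuel : Nat) (mm : List (Int × List Int)) (f : Int) (path : List Int) (d : Int)
    (rest : List (Int × List Int × Int)) (acc : List (List Int)), (8 - d).toNat = fuel →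
    pvLoop mm ((f, path, d) :: rest) acc = pvLoop mm rest (pvDfsA mm fuel f path acc) := by
  intro fuel
  induction fuel with
  | zero =>
    intro mm f path d rest acc h
    have hd : d > 7 := by omega
    rw [pvLoop]
    simp [hd, pvDfsA]
  | succ n ih =>
    intro mm f path d rest acc h
    have hd : ¬ d > 7 := by omega
    rw [pvLoop]
    simp only [if_neg hd]
    cases hv : pvLookup mm f with
    | none => simp [pvDfsA, hv]
    | some children =>
      by_cases hleaf : children = [] ∨ 10 < acc.length
      · simp [pvDfsA, hv, hleaf]
      · simp [pvDfsA, hv, hleaf]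
        exact pvLoop_frames mm n (fun f' p' d' r' a' h' => ih mm f' p' d' r' a' h')
          children path (d + 1) (by omega) rest acc

-- ===== VERDICT (by name: the statement is the Claim_ definition above) =====
theorem dfs_method_chain_spec : Claim_equal_dfs_method_chain := by
  intro f mm res mc depth _hdom _hpre
  unfold Spec_dfs_method_chain dfs_method_chain dfs_method_chain_alt
  by_cases hd : depth > 7
  · have h0 : (8 - depth).toNat = 0 := by omega
    simp [hd, h0, pvDfsA]
  · simp only [if_neg hd]
    have hk : (8 - depth).toNat = ((8 - depth).toNat - 1) + 1 := by omega
    cases hv : pvLookup mm f with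
    | none => rw [hk]; simp [pvDfsA, hv]
    | some temp =>
      by_cases hleaf : temp = [] ∨ 10 < mc.length
      · rw [hk]; simp [pvDfsA, hv, hleaf]
      · simp [hleaf]
        rw [pvLoop_frame ((8 - depth).toNat) mm f res depth [] mc rfl]
        rw [pvLoop]
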